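-- pv_equiv track=rewrite | github.com/MrBrantCode/unitest_baseline | mut_generate/mist_train_taco/taco_18402/solution.py | generate_treasure_key
-- ===== SOURCE A (Python) =====
-- def generate_treasure_key(T, numbers):
--     results = []
--
--     for n in numbers:
--         if n < 3:
--             results.append("-1")
--             continue
--
--         if n % 15 == 0 or n % 3 == 0:
--             sum_digits = 0
--             for _ in range(n):
--                 sum_digits = sum_digits * 10 + 5
--             results.append(str(sum_digits))
--             continue
--
--         if n % 5 == 0:
--             sum_digits = 0
--             for _ in range(n):
--                 sum_digits = sum_digits * 10 + 3
--             results.append(str(sum_digits))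
--             continue
--
--         temp = n
--         while n > 5:
--             n -= 5
--             if n % 3 == 0 and (temp - n) % 5 == 0:
--                 sum_digits = 0
--                 for _ in range(n):
--                     sum_digits = sum_digits * 10 + 5
--                 for _ in range(temp - n):
--                     sum_digits = sum_digits * 10 + 3
--                 results.append(str(sum_digits))
--                 break
--         else:
--             results.append("-1")
--
--     return results
-- ===== SOURCE B (Python) =====
-- def _key_for(n):
--     if n < 3:
--         return "-1"
--     if n % 3 == 0:
--         return "5" * n
--     if n % 5 == 0:
--         return "3" * n
--     # Largest count of 5s is the first (largest) candidate among n-5, n-10, n-15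
--     # that is a positive multiple of 3; candidates farther down repeat residues mod 3.
--     for c in (n - 5, n - 10, n - 15):
--         if c > 0 and c % 3 == 0:
--             return "5" * c + "3" * (n - c)
--     return "-1"
--
-- def generate_treasure_key(T, numbers):
--     return [_key_for(n) for n in numbers]
-- ===== Notes on version B (the rewrite author's own statement) =====
-- stated objective: faster
-- what changed: The unbounded decrement-by-5 search is replaced by a bounded three-candidate check (the first of n-5, n-10, n-15 that is a positive multiple of 3), and the digit strings are built by string repetition instead of accumulating a big integer digit-by-digit and calling str().
import Mathlib
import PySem

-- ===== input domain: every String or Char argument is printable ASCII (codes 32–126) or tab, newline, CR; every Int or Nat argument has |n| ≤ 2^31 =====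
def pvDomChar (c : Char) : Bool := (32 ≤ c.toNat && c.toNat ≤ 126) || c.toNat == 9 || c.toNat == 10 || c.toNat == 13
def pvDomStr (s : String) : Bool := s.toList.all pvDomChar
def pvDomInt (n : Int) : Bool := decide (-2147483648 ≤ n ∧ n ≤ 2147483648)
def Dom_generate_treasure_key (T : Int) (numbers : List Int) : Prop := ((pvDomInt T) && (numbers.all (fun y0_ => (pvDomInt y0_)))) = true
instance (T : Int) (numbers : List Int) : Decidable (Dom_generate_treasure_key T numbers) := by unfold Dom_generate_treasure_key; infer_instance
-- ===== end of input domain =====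

-- B replaces A's unbounded decrement-by-5 search with a bounded three-candidate check and builds
-- the digit strings by repetition instead of accumulating a big integer digit by digit (faster).

-- ===== PORT A =====
-- A's inner `while n > 5: n -= 5; if …: build-and-break` with its `else: append("-1")`.
def generate_treasure_key_search (temp : Int) (n : Int) : String :=
  if h : 5 < n then
    let n' := n - 5
    if PySem.Int.mod n' 3 = 0 ∧ PySem.Int.mod (temp - n') 5 = 0 then
      PySem.Int.toStr ((PySem.List.pyRange 0 (temp - n') 1).foldl (fun s _ => s * 10 + 3)
        ((PySem.List.pyRange 0 n' 1).foldl (fun s _ => s * 10 + 5) 0))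
    else
      generate_treasure_key_search temp n'
  else "-1"
termination_by n.toNat
decreasing_by omega

def generate_treasure_key (T : Int) (numbers : List Int) : List String :=
  numbers.foldl (fun results n =>
    if n < 3 then results ++ ["-1"]
    else if PySem.Int.mod n 15 = 0 ∨ PySem.Int.mod n 3 = 0 then
      results ++ [PySem.Int.toStr ((PySem.List.pyRange 0 n 1).foldl (fun s _ => s * 10 + 5) 0)]
    else if PySem.Int.mod n 5 = 0 then
      results ++ [PySem.Int.toStr ((PySem.List.pyRange 0 n 1).foldl (fun s _ => s * 10 + 3) 0)]
    else
      results ++ [generate_treasure_key_search n n]) []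

-- ===== PORT B =====
-- '5' * c  is ported as  String.ofList (List.replicate c.toNat '5')  (exact: Python char repetition).
def generate_treasure_key_key_for (n : Int) : String :=
  if n < 3 then "-1"
  else if PySem.Int.mod n 3 = 0 then String.ofList (List.replicate n.toNat '5')
  else if PySem.Int.mod n 5 = 0 then String.ofList (List.replicate n.toNat '3')
  else
    match [n - 5, n - 10, n - 15].find?
        (fun c => decide (0 < c) && decide (PySem.Int.mod c 3 = 0)) with
    | some c => String.ofList (List.replicate c.toNat '5' ++ List.replicate (n - c).toNat '3')
    | none => "-1"

def generate_treasure_key_alt (T : Int) (numbers : List Int) : List String :=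
  numbers.map generate_treasure_key_key_for

-- ===== PRECONDITION & SPEC =====
def Spec_generate_treasure_key (T : Int) (numbers : List Int) (out : List String) : Prop := out = generate_treasure_key_alt T numbers
instance (T : Int) (numbers : List Int) (out : List String) : Decidable (Spec_generate_treasure_key T numbers out) := by unfold Spec_generate_treasure_key; infer_instance

-- ===== CLAIM (what is proved, stated in full; the proofs are below) =====
def Claim_equal_generate_treasure_key : Prop := ∀ (T : Int) (numbers : List Int), Dom_generate_treasure_key T numbers → Spec_generate_treasure_key T numbers (generate_treasure_key T numbers)

-- ===== LEMMAS AND PROOFS =====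

lemma pv_range_len (m : Int) : (PySem.List.pyRange 0 m 1).length = m.toNat := by
  unfold PySem.List.pyRange
  split_ifs with h1 h2 <;> simp <;> omega

lemma pv_foldl_const (g : Int → Int) : ∀ (l : List Int) (a : Int),
    l.foldl (fun s _ => g s) a = g^[l.length] a := by
  intro l
  induction l with
  | nil => intro a; rfl
  | cons x xs ih =>
      intro a
      simp only [List.foldl_cons, List.length_cons, ih, Function.iterate_succ_apply]

lemma pv_tdc_append (b : Nat) : ∀ (f n : Nat) (l : List Char),
    Nat.toDigitsCore b f n l = Nat.toDigitsCore b f n [] ++ l := by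
  intro f
  induction f with
  | zero => intro n l; simp [Nat.toDigitsCore]
  | succ f ih =>
      intro n l
      simp only [Nat.toDigitsCore]
      by_cases h : n / b = 0
      · simp [h]
      · simp only [h]
        rw [ih (n / b) ((n % b).digitChar :: l), ih (n / b) [(n % b).digitChar]]
        simp

lemma pv_tdc_fuel : ∀ (n : Nat), ∀ (f : Nat) (l : List Char), n < f →
    Nat.toDigitsCore 10 f n l = Nat.toDigitsCore 10 (n + 1) n l := by
  intro n
  induction n using Nat.strong_induction_on with
  | _ n ih =>
      intro f l hf
      obtain ⟨f', rfl⟩ : ∃ f', f = f' + 1 := ⟨f - 1, by omega⟩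
      simp only [Nat.toDigitsCore]
      by_cases h : n / 10 = 0
      · simp [h]
      · simp only [h]
        have hlt : n / 10 < n := Nat.div_lt_self (by omega) (by omega)
        rw [ih (n / 10) hlt f' _ (by omega), ih (n / 10) hlt n _ (by omega)]

lemma pv_toDigits_step (v d : Nat) (hv : 1 ≤ v) (hd : d < 10) :
    Nat.toDigits 10 (v * 10 + d) = Nat.toDigits 10 v ++ [Nat.digitChar d] := by
  unfold Nat.toDigits
  have hmod : (v * 10 + d) % 10 = d := by omega
  have hdiv : (v * 10 + d) / 10 = v := by omega
  conv_lhs => rw [Nat.toDigitsCore]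
  simp only [hmod, hdiv]
  rw [if_neg (by omega)]
  rw [pv_tdc_fuel v (v * 10 + d) _ (by omega)]
  exact pv_tdc_append 10 (v + 1) v [Nat.digitChar d]

lemma pv_toChars_step (w d : Int) (hw : 1 ≤ w) (hd0 : 0 ≤ d) (hd : d < 10) :
    PySem.Int.toChars (w * 10 + d) = PySem.Int.toChars w ++ [Nat.digitChar d.toNat] := by
  unfold PySem.Int.toChars
  rw [if_neg (by omega), if_neg (by omega)]
  have : (w * 10 + d).toNat = w.toNat * 10 + d.toNat := by omega
  rw [this]
  exact pv_toDigits_step w.toNat d.toNat (by omega) (by omega)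

lemma pv_iter_digit (d : Int) (hd0 : 0 ≤ d) (hd : d < 10) : ∀ (k : Nat) (v : Int), 1 ≤ v →
    1 ≤ (fun s => s * 10 + d)^[k] v ∧
    PySem.Int.toChars ((fun s => s * 10 + d)^[k] v) =
      PySem.Int.toChars v ++ List.replicate k (Nat.digitChar d.toNat) := by
  intro k
  induction k with
  | zero => intro v hv; simp [hv]
  | succ k ih =>
      intro v hv
      obtain ⟨h1, h2⟩ := ih v hv
      have hstep : (fun s => s * 10 + d)^[k + 1] v = ((fun s => s * 10 + d)^[k] v) * 10 + d :=
        Function.iterate_succ_apply' _ _ _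
      rw [hstep]
      refine ⟨by nlinarith, ?_⟩
      rw [pv_toChars_step _ d h1 hd0 hd, h2, List.replicate_succ', List.append_assoc]

lemma pv_iter_digit_zero (d : Int) (hd0 : 1 ≤ d) (hd : d < 10)
    (hc : PySem.Int.toChars d = [Nat.digitChar d.toNat]) : ∀ (k : Nat), 1 ≤ k →
    1 ≤ (fun s => s * 10 + d)^[k] (0 : Int) ∧
    PySem.Int.toChars ((fun s => s * 10 + d)^[k] (0 : Int)) =
      List.replicate k (Nat.digitChar d.toNat) := by
  intro k hk
  obtain ⟨m, rfl⟩ : ∃ m, k = m + 1 := ⟨k - 1, by omega⟩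
  rw [Function.iterate_succ_apply]
  simp only [zero_mul, zero_add]
  obtain ⟨h1, h2⟩ := pv_iter_digit d (by omega) hd m d hd0
  refine ⟨h1, ?_⟩
  rw [h2, hc]
  simp [List.replicate_succ]

-- digit-building loops as strings
lemma pv_fives (n : Int) (hn : 0 < n) :
    PySem.Int.toStr ((PySem.List.pyRange 0 n 1).foldl (fun s _ => s * 10 + 5) 0) =
      String.ofList (List.replicate n.toNat '5') := by
  rw [pv_foldl_const, pv_range_len]
  obtain ⟨-, h⟩ := pv_iter_digit_zero 5 (by omega) (by omega) (by decide) n.toNat (by omega)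
  unfold PySem.Int.toStr
  rw [h]
  rfl

lemma pv_threes (n : Int) (hn : 0 < n) :
    PySem.Int.toStr ((PySem.List.pyRange 0 n 1).foldl (fun s _ => s * 10 + 3) 0) =
      String.ofList (List.replicate n.toNat '3') := by
  rw [pv_foldl_const, pv_range_len]
  obtain ⟨-, h⟩ := pv_iter_digit_zero 3 (by omega) (by omega) (by decide) n.toNat (by omega)
  unfold PySem.Int.toStr
  rw [h]
  rfl

lemma pv_mix (c m : Int) (hc : 0 < c) (_hm : 0 < m) :
    PySem.Int.toStr ((PySem.List.pyRange 0 m 1).foldl (fun s _ => s * 10 + 3)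
        ((PySem.List.pyRange 0 c 1).foldl (fun s _ => s * 10 + 5) 0)) =
      String.ofList (List.replicate c.toNat '5' ++ List.replicate m.toNat '3') := by
  rw [pv_foldl_const, pv_foldl_const, pv_range_len, pv_range_len]
  obtain ⟨hv1, hv2⟩ := pv_iter_digit_zero 5 (by omega) (by omega) (by decide) c.toNat (by omega)
  obtain ⟨-, h2⟩ := pv_iter_digit 3 (by omega) (by omega) m.toNat _ hv1
  unfold PySem.Int.toStr
  rw [h2, hv2]
  rfl

-- B's candidate scan
def pvFind (n : Int) : Option Int :=
  [n - 5, n - 10, n - 15].find? (fun c => decide (0 < c) && decide (PySem.Int.mod c 3 = 0))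

lemma pv_mod3 (a : Int) : PySem.Int.mod a 3 = a % 3 := PySem.Int.mod_eq_emod_of_pos (by omega)
lemma pv_mod5 (a : Int) : PySem.Int.mod a 5 = a % 5 := PySem.Int.mod_eq_emod_of_pos (by omega)

-- A's fallback loop selects exactly B's first positive candidate divisible by 3
lemma pv_search_eq : ∀ (temp n : Int), PySem.Int.mod (temp - n) 5 = 0 →
    generate_treasure_key_search temp n =
      (match pvFind n with
       | some c => PySem.Int.toStr ((PySem.List.pyRange 0 (temp - c) 1).foldl (fun s _ => s * 10 + 3)
            ((PySem.List.pyRange 0 c 1).foldl (fun s _ => s * 10 + 5) 0))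
       | none => "-1") := by
  intro temp n
  induction n using generate_treasure_key_search.induct (temp := temp) with
  | case1 n h n' hcond =>
      intro _
      rw [generate_treasure_key_search, dif_pos h, if_pos hcond]
      have hfind : pvFind n = some (n - 5) := by
        unfold pvFind
        rw [List.find?_cons_of_pos]
        simp only [Bool.and_eq_true, decide_eq_true_eq]
        exact ⟨by omega, hcond.1⟩
      rw [hfind]
  | case2 n h n' hcond ih =>
      intro hinv
      rw [generate_treasure_key_search, dif_pos h, if_neg hcond]
      have hinv' : PySem.Int.mod (temp - (n - 5)) 5 = 0 := by
        rw [pv_mod5] at hinv ⊢; omega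
      have hn3 : ¬ PySem.Int.mod (n - 5) 3 = 0 := fun hx => hcond ⟨hx, hinv'⟩
      rw [ih hinv']
      have hswap : pvFind n = pvFind (n - 5) := by
        unfold pvFind
        rw [pv_mod3] at hn3
        have p5 : (decide (0 < n - 5) && decide (PySem.Int.mod (n - 5) 3 = 0)) = false := by
          simp; intro; omega
        have p20 : (decide (0 < n - 20) && decide (PySem.Int.mod (n - 20) 3 = 0)) = false := by
          simp; intro; omega
        rw [show (n:Int) - 5 - 5 = n - 10 from by ring, show (n:Int) - 5 - 10 = n - 15 from by ring,
          show (n:Int) - 5 - 15 = n - 20 from by ring]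
        simp only [List.find?_cons, p5, p20]
      show (match pvFind (n - 5) with
        | some c => PySem.Int.toStr ((PySem.List.pyRange 0 (temp - c) 1).foldl (fun s _ => s * 10 + 3)
            ((PySem.List.pyRange 0 c 1).foldl (fun s _ => s * 10 + 5) 0))
        | none => "-1") = _
      rw [hswap]
  | case3 n h =>
      intro _
      rw [generate_treasure_key_search, dif_neg h]
      have hfind : pvFind n = none := by
        unfold pvFind
        have h1 : (decide (0 < n - 5) && decide (PySem.Int.mod (n - 5) 3 = 0)) = false := by
          simp; intro; omega
        have h2 : (decide (0 < n - 10) && decide (PySem.Int.mod (n - 10) 3 = 0)) = false := by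
          simp; intro; omega
        have h3 : (decide (0 < n - 15) && decide (PySem.Int.mod (n - 15) 3 = 0)) = false := by
          simp; intro; omega
        simp only [List.find?_cons, h1, h2, h3, List.find?_nil]
      rw [hfind]

-- the per-element equality
lemma pv_key_eq (n : Int) :
    (if n < 3 then "-1"
     else if PySem.Int.mod n 15 = 0 ∨ PySem.Int.mod n 3 = 0 then
       PySem.Int.toStr ((PySem.List.pyRange 0 n 1).foldl (fun s _ => s * 10 + 5) 0)
     else if PySem.Int.mod n 5 = 0 then
       PySem.Int.toStr ((PySem.List.pyRange 0 n 1).foldl (fun s _ => s * 10 + 3) 0)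
     else generate_treasure_key_search n n) = generate_treasure_key_key_for n := by
  unfold generate_treasure_key_key_for
  by_cases h3 : n < 3
  · rw [if_pos h3, if_pos h3]
  · rw [if_neg h3, if_neg h3]
    by_cases hm3 : PySem.Int.mod n 3 = 0
    · rw [if_pos (Or.inr hm3), if_pos hm3]
      exact pv_fives n (by omega)
    · have h15 : ¬ PySem.Int.mod n 15 = 0 := by
        rw [pv_mod3] at hm3
        rw [PySem.Int.mod_eq_emod_of_pos (by omega : (0:Int) < 15)]
        omega
      rw [if_neg (by tauto : ¬ (PySem.Int.mod n 15 = 0 ∨ PySem.Int.mod n 3 = 0)), if_neg hm3]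
      by_cases hm5 : PySem.Int.mod n 5 = 0
      · rw [if_pos hm5, if_pos hm5]
        exact pv_threes n (by omega)
      · rw [if_neg hm5, if_neg hm5]
        have hinv : PySem.Int.mod (n - n) 5 = 0 := by rw [pv_mod5]; simp
        rw [pv_search_eq n n hinv,
          show (List.find? (fun c => decide (0 < c) && decide (PySem.Int.mod c 3 = 0))
            [n - 5, n - 10, n - 15]) = pvFind n from rfl]
        cases hfd : pvFind n with
        | none => rfl
        | some c =>
            have hmem : c ∈ [n - 5, n - 10, n - 15] := List.mem_of_find?_eq_some (by
              show List.find? _ _ = some c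
              exact hfd)
            have hp := List.find?_some (show List.find? _ _ = some c from hfd)
            have hc : 0 < c := by simp at hp; exact hp.1
            have hnc : 0 < n - c := by
              simp at hmem
              rcases hmem with h | h | h <;> omega
            exact pv_mix c (n - c) hc hnc

-- fold/append to map
lemma pv_fold_map : ∀ (l : List Int) (acc : List String),
    l.foldl (fun results n =>
      if n < 3 then results ++ ["-1"]
      else if PySem.Int.mod n 15 = 0 ∨ PySem.Int.mod n 3 = 0 then
        results ++ [PySem.Int.toStr ((PySem.List.pyRange 0 n 1).foldl (fun s _ => s * 10 + 5) 0)]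
      else if PySem.Int.mod n 5 = 0 then
        results ++ [PySem.Int.toStr ((PySem.List.pyRange 0 n 1).foldl (fun s _ => s * 10 + 3) 0)]
      else results ++ [generate_treasure_key_search n n]) acc
    = acc ++ l.map generate_treasure_key_key_for := by
  intro l
  induction l with
  | nil => intro acc; simp
  | cons x xs ih =>
      intro acc
      simp only [List.foldl_cons, List.map_cons]
      rw [ih]
      have hx : (if x < 3 then acc ++ ["-1"]
        else if PySem.Int.mod x 15 = 0 ∨ PySem.Int.mod x 3 = 0 then
          acc ++ [PySem.Int.toStr ((PySem.List.pyRange 0 x 1).foldl (fun s _ => s * 10 + 5) 0)]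
        else if PySem.Int.mod x 5 = 0 then
          acc ++ [PySem.Int.toStr ((PySem.List.pyRange 0 x 1).foldl (fun s _ => s * 10 + 3) 0)]
        else acc ++ [generate_treasure_key_search x x])
        = acc ++ [generate_treasure_key_key_for x] := by
        rw [← pv_key_eq x]
        split_ifs <;> rfl
      rw [hx, List.append_assoc]
      rfl

-- ===== VERDICT (by name: the statement is the Claim_ definition above) =====
theorem generate_treasure_key_spec : Claim_equal_generate_treasure_key := by
  intro T numbers _
  unfold Spec_generate_treasure_key generate_treasure_key generate_treasure_key_alt
  rw [pv_fold_map numbers []]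
  rfl
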